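-- pv_equiv track=rewrite | github.com/zhaoliu0914/CSE4256 | Day4Problems.py | path_m
-- ===== SOURCE A (Python) =====
-- def path_m(n):
--     matrix_array = []
--     for i in range(n):
--         matrix_array.append([0] * n)
--
--     for index in range(n):
--         last_index = index - 1
--         next_index = index + 1
--         if last_index >= 0:
--             matrix_array[index][last_index] = 1
--         if next_index < n:
--             matrix_array[index][next_index] = 1
--     return matrix_array
-- ===== SOURCE B (Python) =====
-- def path_m(n):
--     return [[1 if abs(i - j) == 1 else 0 for j in range(n)] for i in range(n)]
-- ===== Notes on version B (the rewrite author's own statement) =====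
-- stated objective: simpler
-- what changed: Replaces the two-phase allocate-then-mark mutation (zero matrix, then sparse in-place writes with boundary checks) by a single nested comprehension that computes every cell from the closed-form predicate abs(i-j)==1.
import Mathlib
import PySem

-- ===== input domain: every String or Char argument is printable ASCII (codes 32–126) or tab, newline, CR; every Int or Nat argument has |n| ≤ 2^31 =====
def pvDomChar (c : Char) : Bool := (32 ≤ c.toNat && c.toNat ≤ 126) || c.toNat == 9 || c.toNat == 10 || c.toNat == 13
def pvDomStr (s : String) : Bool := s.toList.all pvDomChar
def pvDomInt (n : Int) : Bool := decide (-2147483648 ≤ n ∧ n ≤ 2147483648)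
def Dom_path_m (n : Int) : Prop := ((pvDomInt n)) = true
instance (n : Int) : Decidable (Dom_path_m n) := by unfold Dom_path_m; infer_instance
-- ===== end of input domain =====

-- B replaces A's allocate-then-mark in-place mutation with a nested map computing each
-- cell from the closed-form predicate |i-j| = 1 (objective: simpler; same O(n^2) cost).

-- ===== PORT A =====
-- mat[i][j] = 1 for in-range nonnegative i, j (exact there: A only writes in range)
def pathSet (mat : List (List Int)) (i j : Int) : List (List Int) :=
  mat.set i.toNat ((mat.getD i.toNat []).set j.toNat 1)

def path_m (n : Int) : List (List Int) :=
  let init := (PySem.List.pyRange 0 n 1).foldl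
      (fun acc _ => acc ++ [List.replicate n.toNat (0 : Int)]) []
  (PySem.List.pyRange 0 n 1).foldl
    (fun mat index =>
      let lastIndex := index - 1
      let nextIndex := index + 1
      let mat1 := if 0 ≤ lastIndex then pathSet mat index lastIndex else mat
      if nextIndex < n then pathSet mat1 index nextIndex else mat1)
    init

-- ===== PORT B =====
def path_m_alt (n : Int) : List (List Int) :=
  (PySem.List.pyRange 0 n 1).map (fun i =>
    (PySem.List.pyRange 0 n 1).map (fun j => if (i - j).natAbs = 1 then (1 : Int) else 0))

-- ===== PRECONDITION & SPEC =====
def Spec_path_m (n : Int) (out : List (List Int)) : Prop := out = path_m_alt n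
instance (n : Int) (out : List (List Int)) : Decidable (Spec_path_m n out) := by unfold Spec_path_m; infer_instance

-- ===== CLAIM (what is proved, stated in full; the proofs are below) =====
def Claim_equal_path_m : Prop := ∀ (n : Int), Dom_path_m n → Spec_path_m n (path_m n)

-- ===== LEMMAS AND PROOFS =====

-- the final row i of an n×n path matrix, Nat-indexed
def pathRow (m i : Nat) : List Int :=
  (List.range m).map (fun (j : Nat) => if ((i : Int) - (j : Int)).natAbs = 1 then (1 : Int) else 0)

lemma pathRow_length (m i : Nat) : (pathRow m i).length = m := by
  simp [pathRow]

lemma map_range_set (m k : Nat) (g : Nat → List Int) (r : List Int) :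
    ((List.range m).map g).set k r
      = (List.range m).map (fun i => if i = k then r else g i) := by
  apply List.ext_getElem
  · simp
  · intro i h1 h2
    simp only [List.getElem_set, List.getElem_map, List.getElem_range]
    by_cases h : k = i
    · subst h; simp
    · rw [if_neg h, if_neg (Ne.symm h)]

lemma map_range_getD (m k : Nat) (g : Nat → List Int) (hk : k < m) :
    ((List.range m).map g).getD k [] = g k := by
  have h : k < ((List.range m).map g).length := by simpa using hk
  rw [List.getD_eq_getElem _ _ h]
  simp

-- one loop body applied to the partially-filled matrix fills in row k
lemma step_eq (n : Int) (k : Nat) (hm : k < n.toNat) :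
    (fun mat index =>
      let lastIndex := index - 1
      let nextIndex := index + 1
      let mat1 := if 0 ≤ lastIndex then pathSet mat index lastIndex else mat
      if nextIndex < n then pathSet mat1 index nextIndex else mat1)
      ((List.range n.toNat).map
        (fun i => if i < k then pathRow n.toNat i else List.replicate n.toNat 0)) (k : Int)
    = (List.range n.toNat).map
        (fun i => if i < k + 1 then pathRow n.toNat i else List.replicate n.toNat 0) := by
  have hn : n = (n.toNat : Int) := by omega
  have hkk : ¬ k < k := by omega
  have hnext : ((k : Int) + 1 < n) = (k + 1 < n.toNat) := by
    simp only [eq_iff_iff]; omega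
  have hlast : (0 ≤ (k : Int) - 1) = (1 ≤ k) := by
    simp only [eq_iff_iff]; omega
  have ht1 : ((k : Int) - 1).toNat = k - 1 := by omega
  have ht2 : ((k : Int) + 1).toNat = k + 1 := by omega
  have ht0 : ((k : Int)).toNat = k := by omega
  -- the row written into position k by this iteration
  have hrow : ∀ (r : List Int) (hr : r.length = n.toNat)
      (hspec : ∀ j (hj : j < n.toNat),
        r[j]'(by omega) = if ((k : Int) - (j : Int)).natAbs = 1 then (1 : Int) else 0),
      r = pathRow n.toNat k := by
    intro r hr hspec
    apply List.ext_getElem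
    · simp [hr, pathRow_length]
    · intro j hj1 hj2
      simp only [pathRow_length] at hj2
      rw [hspec j (by omega)]
      simp only [pathRow, List.getElem_map, List.getElem_range]
  have hmerge : ∀ (r : List Int), r = pathRow n.toNat k →
      (List.range n.toNat).map
        (fun i => if i = k then r else
          if i < k then pathRow n.toNat i else List.replicate n.toNat 0)
      = (List.range n.toNat).map
        (fun i => if i < k + 1 then pathRow n.toNat i else List.replicate n.toNat 0) := by
    intro r hr; subst hr
    apply List.map_congr_left
    intro i hi
    by_cases hik : i = k
    · subst hik; rw [if_pos rfl, if_pos (by omega)]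
    · rw [if_neg hik]
      by_cases hlt : i < k
      · rw [if_pos hlt, if_pos (by omega)]
      · rw [if_neg hlt, if_neg (by omega)]
  have hdup : ∀ (r2 r1 : List Int),
      (List.range n.toNat).map (fun i => if i = k then r2 else if i = k then r1 else
        if i < k then pathRow n.toNat i else List.replicate n.toNat 0)
      = (List.range n.toNat).map (fun i => if i = k then r2 else
        if i < k then pathRow n.toNat i else List.replicate n.toNat 0) := by
    intro r2 r1
    apply List.map_congr_left
    intro i _
    by_cases h : i = k <;> simp [h]
  dsimp only
  simp only [pathSet, hnext, hlast, ht0, ht1, ht2]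
  by_cases h1 : 1 ≤ k
  · rw [if_pos h1, map_range_getD _ _ _ hm, if_neg hkk, map_range_set]
    by_cases h2 : k + 1 < n.toNat
    · rw [if_pos h2, map_range_getD _ _ _ hm, if_pos rfl, map_range_set, hdup]
      apply hmerge
      refine hrow _ (by simp) ?_
      intro j hj
      simp only [List.getElem_set, List.getElem_replicate]
      split_ifs <;> omega
    · rw [if_neg h2]
      apply hmerge
      refine hrow _ (by simp) ?_
      intro j hj
      simp only [List.getElem_set, List.getElem_replicate]
      split_ifs <;> omega
  · rw [if_neg h1]
    by_cases h2 : k + 1 < n.toNat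
    · rw [if_pos h2, map_range_getD _ _ _ hm, if_neg hkk, map_range_set]
      apply hmerge
      refine hrow _ (by simp) ?_
      intro j hj
      simp only [List.getElem_set, List.getElem_replicate]
      split_ifs <;> omega
    · rw [if_neg h2]
      apply List.map_congr_left
      intro i hi
      simp only [List.mem_range] at hi
      rw [if_neg (by omega), if_pos (by omega)]
      have hi0 : i = 0 := by omega
      have hm1 : n.toNat = 1 := by omega
      rw [hi0, hm1]
      decide

lemma fold_invariant (n : Int) (k : Nat) (hk : k ≤ n.toNat) :
    List.foldl
      (fun mat index =>
        let lastIndex := index - 1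
        let nextIndex := index + 1
        let mat1 := if 0 ≤ lastIndex then pathSet mat index lastIndex else mat
        if nextIndex < n then pathSet mat1 index nextIndex else mat1)
      ((List.range n.toNat).map (fun _ => List.replicate n.toNat (0 : Int)))
      ((List.range k).map (fun j => ((j : Nat) : Int)))
    = (List.range n.toNat).map
        (fun i => if i < k then pathRow n.toNat i else List.replicate n.toNat 0) := by
  induction k with
  | zero => simp
  | succ k ih =>
    rw [List.range_succ, List.map_append, List.foldl_append, ih (by omega)]
    simp only [List.map_cons, List.map_nil, List.foldl_cons, List.foldl_nil]
    exact step_eq n k (by omega)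

-- ===== VERDICT (by name: the statement is the Claim_ definition above) =====
theorem path_m_spec : Claim_equal_path_m := by
  intro n _
  unfold Spec_path_m path_m path_m_alt
  rw [PySem.List.pyRange_one]
  simp only [Int.sub_zero, Int.zero_add, PySem.List.foldl_append_singleton_eq_map,
    List.nil_append, List.map_map, Function.comp_def]
  have := fold_invariant n n.toNat (by omega)
  rw [this]
  apply List.map_congr_left
  intro i hi
  simp only [List.mem_range] at hi
  rw [if_pos hi]
  simp [pathRow]
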